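-- pv_equiv track=rewrite | github.com/miliar/Code_Jam_Webscraper | solutions_python/solutions_year12_round0_nr3/325.py | solve
-- ===== SOURCE A (Python) =====
-- def solve(A, B):
--     count = 0
--     for n in range(A, B):
--         seen = set()
--         digits = str(n)
--         k = len(digits)
--         for i in range(1, k):
--             if digits[i] != 0:
--                 m = int(digits[i:] + digits[:i])
--                 if n < m <= B and m not in seen:
--                     count += 1
--                     seen.add(m)
--     return count
-- ===== SOURCE B (Python) =====
-- def _insertion_point(a, x):
--     # rightmost insertion point for x in sorted list a (hand-written bisect_right)
--     lo, hi = 0, len(a)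
--     while lo < hi:
--         mid = (lo + hi) // 2
--         if x < a[mid]:
--             hi = mid
--         else:
--             lo = mid + 1
--     return lo
--
--
-- def solve(A, B):
--     total = 0
--     for n in range(A, B):
--         s = str(n)
--         rots = sorted({int(s[i:] + s[:i]) for i in range(1, len(s))})
--         total += _insertion_point(rots, B) - _insertion_point(rots, n)
--     return total
-- ===== Notes on version B (the rewrite author's own statement) =====
-- stated objective: alternative
-- what changed: B drops A's per-rotation interval test with a seen-set and running counter: for each n it collects the distinct rotation values in a set comprehension, sorts them once, and obtains the number of values in (n, B] arithmetically as the difference of two hand-written binary-search insertion points (bisect_right for B minus bisect_right for n).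
import Mathlib
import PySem

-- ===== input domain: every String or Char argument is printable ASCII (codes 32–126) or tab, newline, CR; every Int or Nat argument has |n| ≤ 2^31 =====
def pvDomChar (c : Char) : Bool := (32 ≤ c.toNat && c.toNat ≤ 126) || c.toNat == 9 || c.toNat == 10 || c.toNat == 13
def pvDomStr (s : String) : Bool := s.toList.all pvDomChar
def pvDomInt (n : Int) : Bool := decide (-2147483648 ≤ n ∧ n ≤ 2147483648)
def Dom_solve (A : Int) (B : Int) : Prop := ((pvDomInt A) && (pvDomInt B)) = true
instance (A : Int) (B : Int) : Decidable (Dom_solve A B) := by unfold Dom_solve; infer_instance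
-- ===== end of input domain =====

-- One honest line: B replaces A's per-rotation interval test with a per-seen-set counter
-- by collecting each n's distinct rotation values, sorting them once, and counting the
-- values in (n, B] as a difference of two hand-written binary-search insertion points
-- (objective: alternative, same asymptotic cost).

-- ===== PORT A =====
def solve (A : Int) (B : Int) : Int :=
  (PySem.List.pyRange A B 1).foldl (fun count n =>
    let digits := PySem.Int.toChars n
    let k : Int := PySem.Chars.len digits
    ((PySem.List.pyRange 1 k 1).foldl
        (fun (st : Int × PySem.Set Int) i =>
          -- Python's 'digits[i] != 0' compares a 1-char string with the int 0: always True
          -- int(...) raises only outside Pre_solve; .getD 0 is never reached under Pre_solve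
          let m := (PySem.Int.ofChars?
            (PySem.Chars.slice digits (some i) none ++ PySem.Chars.slice digits none (some i))).getD 0
          if (decide (n < m) && decide (m ≤ B)) && !(PySem.Set.contains st.2 m) then
            (st.1 + 1, PySem.Set.add st.2 m)
          else st)
        (count, PySem.Set.empty)).1)
    0

-- ===== PORT B =====
-- _insertion_point(a, x): hand-written bisect_right, the while loop as the obvious recursion on lo/hi
def solveAltInsPt (a : List Int) (x : Int) (lo hi : Int) : Int :=
  if h : lo < hi then
    let mid := PySem.Int.floordiv (lo + hi) 2
    -- a[mid] is in range on every call B makes (0 ≤ lo ≤ mid < hi ≤ len a); .getD 0 is never reached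
    if x < (PySem.List.pyGet? a mid).getD 0 then solveAltInsPt a x lo mid
    else solveAltInsPt a x (mid + 1) hi
  else lo
termination_by (hi - lo).toNat
decreasing_by
  · have hlt : PySem.Int.floordiv (lo + hi) 2 < hi :=
      (PySem.Int.floordiv_lt_iff_lt_mul (by omega)).mpr (by omega)
    omega
  · have hlt : PySem.Int.floordiv (lo + hi) 2 < hi :=
      (PySem.Int.floordiv_lt_iff_lt_mul (by omega)).mpr (by omega)
    have hb := PySem.Int.floordiv_two_mid_bounds (le_of_lt h)
    omega

def solve_alt (A : Int) (B : Int) : Int :=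
  (PySem.List.pyRange A B 1).foldl (fun total n =>
    let s := PySem.Int.toChars n
    let rots := PySem.List.sorted
      ((PySem.List.pyRange 1 (PySem.Chars.len s) 1).foldl
        (fun (st : PySem.Set Int) i =>
          -- int(...) raises only outside Pre_solve; .getD 0 is never reached under Pre_solve
          PySem.Set.add st ((PySem.Int.ofChars?
            (PySem.Chars.slice s (some i) none ++ PySem.Chars.slice s none (some i))).getD 0))
        PySem.Set.empty)
      (fun x => x) false
    total + (solveAltInsPt rots B 0 (PySem.List.len rots)
              - solveAltInsPt rots n 0 (PySem.List.len rots)))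
    0

-- ===== PRECONDITION & SPEC =====
-- Pre_solve excludes exactly the inputs on which Python A raises ValueError: any range
-- containing a negative n makes int(rotated str(n)) parse a string with an inner '-'.
def Pre_solve (A : Int) (B : Int) : Prop := 0 ≤ A ∨ B ≤ A
instance (A : Int) (B : Int) : Decidable (Pre_solve A B) := by unfold Pre_solve; infer_instance
def pvWitness_solve : Int × Int := (0, 25)

def Spec_solve (A : Int) (B : Int) (out : Int) : Prop := out = solve_alt A B
instance (A : Int) (B : Int) (out : Int) : Decidable (Spec_solve A B out) := by unfold Spec_solve; infer_instance

-- ===== CLAIM (what is proved, stated in full; the proofs are below) =====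
def Claim_equal_solve : Prop := ∀ (A : Int) (B : Int), Dom_solve A B → Pre_solve A B → Spec_solve A B (solve A B)

-- ===== LEMMAS AND PROOFS =====

-- the qualifying test 'n < m <= B'
def pvQual (n B m : Int) : Bool := decide (n < m) && decide (m ≤ B)
-- the j-th rotation of a digit string
def pvRot (s : List Char) (j : Nat) : List Char := s.drop j ++ s.take j
-- the int value Python computes for the j-th rotation
def pvVal (s : List Char) (j : Nat) : Int := (PySem.Int.ofChars? (pvRot s j)).getD 0
-- the rotation values n generates (split points i = 1 .. k-1)
def pvVals (s : List Char) : List Int := (List.range (s.length - 1)).map (fun t => pvVal s (t + 1))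
-- A's inner-loop body, on the rotation value
def pvBodyA (q : Int → Bool) (st : Int × PySem.Set Int) (m : Int) : Int × PySem.Set Int :=
  if q m && !(PySem.Set.contains st.2 m) then (st.1 + 1, PySem.Set.add st.2 m) else st

-- A's inner loop: a seen-set fold counts the distinct qualifying values
lemma foldA_gen (q : Int → Bool) (l : List Int) (c : Int) (seen : PySem.Set Int) :
    l.foldl (pvBodyA q) (c, seen)
    = (c + ((PySem.Set.update seen (l.filter q)).length : Int) - (seen.length : Int),
       PySem.Set.update seen (l.filter q)) := by
  induction l generalizing c seen with
  | nil => simp [PySem.Set.update_nil]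
  | cons m l ih =>
    rw [List.foldl_cons]
    by_cases hq : q m = true
    · rw [List.filter_cons_of_pos hq, PySem.Set.update_cons]
      by_cases hc : m ∈ seen
      · have hadd : PySem.Set.add seen m = seen := PySem.Set.add_of_mem hc
        have hstep : pvBodyA q (c, seen) m = (c, seen) := by simp [pvBodyA, hq, hc]
        rw [hstep, ih, hadd]
      · have hadd : PySem.Set.add seen m = seen ++ [m] := PySem.Set.add_of_not_mem hc
        have hstep : pvBodyA q (c, seen) m = (c + 1, PySem.Set.add seen m) := by
          simp [pvBodyA, hq, hc]
        rw [hstep, ih]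
        simp only [Prod.mk.injEq, and_true]
        rw [hadd]
        simp only [List.length_append, List.length_singleton]
        push_cast
        ring
    · have hstep : pvBodyA q (c, seen) m = (c, seen) := by
        simp [pvBodyA, hq]
      rw [hstep, ih, List.filter_cons_of_neg (by simp [hq])]

-- the canonical form of A's whole inner loop for one n
lemma innerA (n B c : Int) :
    ((PySem.List.pyRange 1 (PySem.Chars.len (PySem.Int.toChars n)) 1).foldl
        (fun (st : Int × PySem.Set Int) i =>
          let m := (PySem.Int.ofChars?
            (PySem.Chars.slice (PySem.Int.toChars n) (some i) none
              ++ PySem.Chars.slice (PySem.Int.toChars n) none (some i))).getD 0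
          if (decide (n < m) && decide (m ≤ B)) && !(PySem.Set.contains st.2 m) then
            (st.1 + 1, PySem.Set.add st.2 m)
          else st)
        (c, PySem.Set.empty)).1
    = c + ((PySem.Set.ofList ((pvVals (PySem.Int.toChars n)).filter (pvQual n B))).length : Int) := by
  set s := PySem.Int.toChars n with hs
  rw [PySem.Chars.len_eq, PySem.List.pyRange_one]
  have hK : ((s.length : Int) - 1).toNat = s.length - 1 := by omega
  rw [List.foldl_map, hK]
  have hbody : (fun (st : Int × PySem.Set Int) (k : Nat) =>
      (fun (st : Int × PySem.Set Int) (i : Int) =>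
        let m := (PySem.Int.ofChars?
          (PySem.Chars.slice s (some i) none ++ PySem.Chars.slice s none (some i))).getD 0
        if (decide (n < m) && decide (m ≤ B)) && !(PySem.Set.contains st.2 m) then
          (st.1 + 1, PySem.Set.add st.2 m)
        else st) st ((1 : Int) + (k : Int)))
      = (fun st k => pvBodyA (pvQual n B) st (pvVal s (k + 1))) := by
    funext st k
    have h1 : (1 : Int) + (k : Int) = ((k + 1 : Nat) : Int) := by push_cast; ring
    simp only [h1, PySem.Chars.slice_eq_listSlice, PySem.List.slice_from_natCast,
      PySem.List.slice_to_natCast, pvBodyA, pvQual, pvVal, pvRot]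
    rfl
  rw [hbody]
  have h2 := foldA_gen (pvQual n B) (pvVals s) c PySem.Set.empty
  unfold pvVals at h2
  rw [List.foldl_map] at h2
  rw [h2]
  show c + ((PySem.Set.update PySem.Set.empty ((pvVals s).filter (pvQual n B))).length : Int)
      - ((PySem.Set.empty : PySem.Set Int).length : Int) = _
  have hemp : (PySem.Set.empty : PySem.Set Int) = ([] : List Int) := rfl
  rw [hemp, PySem.Set.update_nil_left]
  simp

-- B's set comprehension: a fold of adds is Set.ofList of the generated values
lemma foldl_add_eq_ofList {α : Type} (f : α → Int) (l : List α) :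
    l.foldl (fun (st : PySem.Set Int) i => PySem.Set.add st (f i)) PySem.Set.empty
      = PySem.Set.ofList (l.map f) := by
  have hgen : ∀ (st : PySem.Set Int),
      l.foldl (fun st i => PySem.Set.add st (f i)) st = PySem.Set.update st (l.map f) := by
    induction l with
    | nil => intro st; simp [PySem.Set.update_nil]
    | cons x t ih => intro st; rw [List.foldl_cons, List.map_cons, PySem.Set.update_cons, ih]
  have hemp : (PySem.Set.empty : PySem.Set Int) = ([] : List Int) := rfl
  rw [hgen, hemp, PySem.Set.update_nil_left]

-- the insertion-point recursion returns the number of elements ≤ x of a ≤-sorted list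
lemma insPt_go (L : List Int) (x : Int) (hp : L.Pairwise (fun a b : Int => a ≤ b)) :
    ∀ (d : Nat) (lo hi : Int), (hi - lo).toNat = d → 0 ≤ lo → lo ≤ hi → hi ≤ (L.length : Int) →
    (∀ (j : Nat), j < lo.toNat → ∀ (hj : j < L.length), L[j] ≤ x) →
    (∀ (j : Nat), hi.toNat ≤ j → ∀ (hj : j < L.length), x < L[j]) →
    solveAltInsPt L x lo hi = (L.countP (fun y => decide (y ≤ x)) : Int) := by
  have hmono : ∀ (p q : Nat) (hq : q < L.length) (hpq : p ≤ q), L[p]'(by omega) ≤ L[q] := by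
    intro p q hq hpq
    rcases Nat.eq_or_lt_of_le hpq with h | h
    · subst h; exact le_rfl
    · exact List.pairwise_iff_getElem.mp hp p q (Nat.lt_trans h hq) hq h
  intro d
  induction d using Nat.strong_induction_on with
  | _ d ih =>
  intro lo hi hd h0 hlh hhl hlow hhigh
  by_cases hlt : lo < hi
  · rw [solveAltInsPt, dif_pos hlt]
    show (if x < (PySem.List.pyGet? L (PySem.Int.floordiv (lo + hi) 2)).getD 0
        then solveAltInsPt L x lo (PySem.Int.floordiv (lo + hi) 2)
        else solveAltInsPt L x (PySem.Int.floordiv (lo + hi) 2 + 1) hi)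
      = (L.countP (fun y => decide (y ≤ x)) : Int)
    have hb := PySem.Int.floordiv_two_mid_bounds (le_of_lt hlt)
    have hmidlt : PySem.Int.floordiv (lo + hi) 2 < hi :=
      (PySem.Int.floordiv_lt_iff_lt_mul (by omega)).mpr (by omega)
    set mid := PySem.Int.floordiv (lo + hi) 2 with hmid
    have hm0 : 0 ≤ mid := by omega
    have hmlen : mid < (L.length : Int) := by omega
    rw [PySem.List.pyGet?_eq_some_getElem L hm0 hmlen]
    simp only [Option.getD_some]
    by_cases hcmp : x < L[mid.toNat]'(by omega)
    · rw [if_pos hcmp]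
      apply ih (mid - lo).toNat (by omega) lo mid rfl h0 (by omega) (by omega) hlow
      intro j hj hjl
      have := hmono mid.toNat j hjl (by omega)
      omega
    · rw [if_neg hcmp]
      apply ih (hi - (mid + 1)).toNat (by omega) (mid + 1) hi rfl (by omega) (by omega) hhl
      · intro j hj hjl
        have := hmono j mid.toNat (by omega) (by omega)
        omega
      · exact hhigh
  · rw [solveAltInsPt, dif_neg (by omega)]
    have hlen : lo.toNat ≤ L.length := by omega
    -- lo = hi: every index < lo is ≤ x, every index ≥ lo is > x, so countP = lo
    have h1 : (L.take lo.toNat).countP (fun y => decide (y ≤ x)) = lo.toNat := by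
      have hall : ∀ y ∈ L.take lo.toNat, decide (y ≤ x) = true := by
        intro y hy
        obtain ⟨j, hj, rfl⟩ := List.mem_iff_getElem.mp hy
        have hjl : j < lo.toNat ∧ j < L.length := by
          rw [List.length_take] at hj; omega
        rw [List.getElem_take]
        exact decide_eq_true_iff.mpr (hlow j hjl.1 hjl.2)
      rw [List.countP_eq_length.mpr hall, List.length_take]
      omega
    have h2 : (L.drop lo.toNat).countP (fun y => decide (y ≤ x)) = 0 := by
      apply List.countP_eq_zero.mpr
      intro y hy
      obtain ⟨j, hj, rfl⟩ := List.mem_iff_getElem.mp hy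
      have hjl : lo.toNat + j < L.length := by
        rw [List.length_drop] at hj; omega
      rw [List.getElem_drop]
      simpa using hhigh (lo.toNat + j) (by omega) hjl
    have hcount : L.countP (fun y => decide (y ≤ x)) = lo.toNat := by
      conv_lhs => rw [← List.take_append_drop lo.toNat L]
      rw [List.countP_append, h1, h2]
      omega
    rw [hcount]
    omega

-- counting elements ≤ B splits at n when n ≤ B
lemma countP_split (L : List Int) (n B : Int) (h : n ≤ B) :
    L.countP (fun y => decide (y ≤ B))
      = L.countP (fun y => decide (y ≤ n)) + L.countP (pvQual n B) := by
  induction L with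
  | nil => simp
  | cons y t ih =>
    simp only [List.countP_cons, pvQual, ih]
    by_cases h1 : y ≤ B <;> by_cases h2 : y ≤ n
    · simp [h1, h2, not_lt.mpr h2]; omega
    · simp [h1, h2, not_le.mp h2]; omega
    · exact absurd (le_trans h2 h) h1
    · simp [h1, h2]

-- dedup-then-filter and filter-then-dedup have the same length
lemma length_ofList_filter (p : Int → Bool) (l : List Int) :
    ((PySem.Set.ofList l).filter p).length = (PySem.Set.ofList (l.filter p)).length := by
  have hperm : ((PySem.Set.ofList l).filter p).Perm (PySem.Set.ofList (l.filter p)) := by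
    rw [List.perm_ext_iff_of_nodup ((PySem.Set.nodup_ofList l).filter p)
      (PySem.Set.nodup_ofList _)]
    intro a
    simp [List.mem_filter, PySem.Set.mem_ofList]
  exact hperm.length_eq

-- the canonical form of B's whole per-n term
lemma innerB (n B : Int) (hnB : n < B) :
    (solveAltInsPt (PySem.List.sorted
        ((PySem.List.pyRange 1 (PySem.Chars.len (PySem.Int.toChars n)) 1).foldl
          (fun (st : PySem.Set Int) i =>
            PySem.Set.add st ((PySem.Int.ofChars?
              (PySem.Chars.slice (PySem.Int.toChars n) (some i) none
                ++ PySem.Chars.slice (PySem.Int.toChars n) none (some i))).getD 0))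
          PySem.Set.empty) (fun x => x) false) B 0
        (PySem.List.len (PySem.List.sorted
          ((PySem.List.pyRange 1 (PySem.Chars.len (PySem.Int.toChars n)) 1).foldl
            (fun (st : PySem.Set Int) i =>
              PySem.Set.add st ((PySem.Int.ofChars?
                (PySem.Chars.slice (PySem.Int.toChars n) (some i) none
                  ++ PySem.Chars.slice (PySem.Int.toChars n) none (some i))).getD 0))
            PySem.Set.empty) (fun x => x) false))
      - solveAltInsPt (PySem.List.sorted
        ((PySem.List.pyRange 1 (PySem.Chars.len (PySem.Int.toChars n)) 1).foldl
          (fun (st : PySem.Set Int) i =>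
            PySem.Set.add st ((PySem.Int.ofChars?
              (PySem.Chars.slice (PySem.Int.toChars n) (some i) none
                ++ PySem.Chars.slice (PySem.Int.toChars n) none (some i))).getD 0))
          PySem.Set.empty) (fun x => x) false) n 0
        (PySem.List.len (PySem.List.sorted
          ((PySem.List.pyRange 1 (PySem.Chars.len (PySem.Int.toChars n)) 1).foldl
            (fun (st : PySem.Set Int) i =>
              PySem.Set.add st ((PySem.Int.ofChars?
                (PySem.Chars.slice (PySem.Int.toChars n) (some i) none
                  ++ PySem.Chars.slice (PySem.Int.toChars n) none (some i))).getD 0))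
            PySem.Set.empty) (fun x => x) false)))
    = ((PySem.Set.ofList ((pvVals (PySem.Int.toChars n)).filter (pvQual n B))).length : Int) := by
  set s := PySem.Int.toChars n with hs
  -- the generated set is the distinct rotation values
  have hvals : (PySem.List.pyRange 1 (PySem.Chars.len s) 1).foldl
      (fun (st : PySem.Set Int) i =>
        PySem.Set.add st ((PySem.Int.ofChars?
          (PySem.Chars.slice s (some i) none ++ PySem.Chars.slice s none (some i))).getD 0))
      PySem.Set.empty
      = PySem.Set.ofList (pvVals s) := by
    rw [PySem.Chars.len_eq, PySem.List.pyRange_one]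
    have hK : ((s.length : Int) - 1).toNat = s.length - 1 := by omega
    rw [List.foldl_map, hK]
    have hbody : (fun (st : PySem.Set Int) (k : Nat) =>
        (fun (st : PySem.Set Int) (i : Int) =>
          PySem.Set.add st ((PySem.Int.ofChars?
            (PySem.Chars.slice s (some i) none ++ PySem.Chars.slice s none (some i))).getD 0))
          st ((1 : Int) + (k : Int)))
        = (fun (st : PySem.Set Int) (k : Nat) => PySem.Set.add st (pvVal s (k + 1))) := by
      funext st k
      have h1 : (1 : Int) + (k : Int) = ((k + 1 : Nat) : Int) := by push_cast; ring
      simp only [h1, PySem.Chars.slice_eq_listSlice, PySem.List.slice_from_natCast,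
        PySem.List.slice_to_natCast, pvVal, pvRot]
    rw [hbody]
    exact foldl_add_eq_ofList (fun k => pvVal s (k + 1)) (List.range (s.length - 1))
  rw [hvals]
  set L := PySem.List.sorted (PySem.Set.ofList (pvVals s)) (fun x => x) false with hL
  have hplt : L.Pairwise (fun a b : Int => a < b) := PySem.List.sorted_ofList_pairwise_lt _
  have hple : L.Pairwise (fun a b : Int => a ≤ b) := hplt.imp le_of_lt
  have hperm : L.Perm (PySem.Set.ofList (pvVals s)) := PySem.List.sorted_perm _ _ _
  have hlen : PySem.List.len L = (L.length : Int) := PySem.List.len_eq L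
  have hbsr : ∀ x : Int, solveAltInsPt L x 0 (PySem.List.len L)
      = (L.countP (fun y => decide (y ≤ x)) : Int) := by
    intro x
    rw [hlen]
    exact insPt_go L x hple L.length 0 (L.length : Int) (by omega) (by omega) (by omega)
      (by omega) (fun j hj hjl => by omega)
      (fun j hj hjl => absurd hjl (by omega))
  rw [hbsr B, hbsr n]
  have hsplit := countP_split L n B (le_of_lt hnB)
  have hq : L.countP (pvQual n B)
      = (PySem.Set.ofList ((pvVals s).filter (pvQual n B))).length := by
    rw [hperm.countP_eq, List.countP_eq_length_filter, length_ofList_filter]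
  omega

-- the two per-n steps agree (the beta/zeta-reduced bodies of the two outer loops)
lemma step_eq (B acc n : Int) (hnB : n < B) :
    ((PySem.List.pyRange 1 (PySem.Chars.len (PySem.Int.toChars n)) 1).foldl
        (fun (st : Int × PySem.Set Int) i =>
          let m := (PySem.Int.ofChars?
            (PySem.Chars.slice (PySem.Int.toChars n) (some i) none
              ++ PySem.Chars.slice (PySem.Int.toChars n) none (some i))).getD 0
          if (decide (n < m) && decide (m ≤ B)) && !(PySem.Set.contains st.2 m) then
            (st.1 + 1, PySem.Set.add st.2 m)
          else st)
        (acc, PySem.Set.empty)).1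
    = acc + (solveAltInsPt (PySem.List.sorted
        ((PySem.List.pyRange 1 (PySem.Chars.len (PySem.Int.toChars n)) 1).foldl
          (fun (st : PySem.Set Int) i =>
            PySem.Set.add st ((PySem.Int.ofChars?
              (PySem.Chars.slice (PySem.Int.toChars n) (some i) none
                ++ PySem.Chars.slice (PySem.Int.toChars n) none (some i))).getD 0))
          PySem.Set.empty) (fun x => x) false) B 0
        (PySem.List.len (PySem.List.sorted
          ((PySem.List.pyRange 1 (PySem.Chars.len (PySem.Int.toChars n)) 1).foldl
            (fun (st : PySem.Set Int) i =>
              PySem.Set.add st ((PySem.Int.ofChars?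
                (PySem.Chars.slice (PySem.Int.toChars n) (some i) none
                  ++ PySem.Chars.slice (PySem.Int.toChars n) none (some i))).getD 0))
            PySem.Set.empty) (fun x => x) false))
              - solveAltInsPt (PySem.List.sorted
        ((PySem.List.pyRange 1 (PySem.Chars.len (PySem.Int.toChars n)) 1).foldl
          (fun (st : PySem.Set Int) i =>
            PySem.Set.add st ((PySem.Int.ofChars?
              (PySem.Chars.slice (PySem.Int.toChars n) (some i) none
                ++ PySem.Chars.slice (PySem.Int.toChars n) none (some i))).getD 0))
          PySem.Set.empty) (fun x => x) false) n 0
        (PySem.List.len (PySem.List.sorted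
          ((PySem.List.pyRange 1 (PySem.Chars.len (PySem.Int.toChars n)) 1).foldl
            (fun (st : PySem.Set Int) i =>
              PySem.Set.add st ((PySem.Int.ofChars?
                (PySem.Chars.slice (PySem.Int.toChars n) (some i) none
                  ++ PySem.Chars.slice (PySem.Int.toChars n) none (some i))).getD 0))
            PySem.Set.empty) (fun x => x) false))) := by
  rw [innerA n B acc, innerB n B hnB]

-- ===== VERDICT (by name: the statement is the Claim_ definition above) =====
theorem solve_spec : Claim_equal_solve := by
  intro A B _ _
  show solve A B = solve_alt A B
  unfold solve solve_alt
  exact PySem.List.foldl_congr_mem _ _ _ 0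
    (fun acc n hn => step_eq B acc n (PySem.List.mem_pyRange_one.mp hn).2)
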